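-- pv_equiv track=rewrite | github.com/Musa19992/Eyler | 32.py | pan_chifr
-- ===== SOURCE A (Python) =====
-- def pan_chifr(i):
--     lst = []
--     for g in str(i):
--         if g not in lst and g != '0':
--             lst.append(g)
--     if (len(lst) == len(str(i))):
--         return True
--     else:
--         return False
-- ===== SOURCE B (Python) =====
-- def pan_chifr(i):
--     prev = None
--     for g in sorted(str(i)):
--         if g == '0' or g == prev:
--             return False
--         prev = g
--     return True
-- ===== Notes on version B (the rewrite author's own statement) =====
-- stated objective: alternative
-- what changed: Replaces A's accumulator loop with an inner membership scan by a sort-then-scan: sort the characters, then one pass comparing each to its predecessor (duplicates are adjacent after sorting) and rejecting '0'.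
import Mathlib
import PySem

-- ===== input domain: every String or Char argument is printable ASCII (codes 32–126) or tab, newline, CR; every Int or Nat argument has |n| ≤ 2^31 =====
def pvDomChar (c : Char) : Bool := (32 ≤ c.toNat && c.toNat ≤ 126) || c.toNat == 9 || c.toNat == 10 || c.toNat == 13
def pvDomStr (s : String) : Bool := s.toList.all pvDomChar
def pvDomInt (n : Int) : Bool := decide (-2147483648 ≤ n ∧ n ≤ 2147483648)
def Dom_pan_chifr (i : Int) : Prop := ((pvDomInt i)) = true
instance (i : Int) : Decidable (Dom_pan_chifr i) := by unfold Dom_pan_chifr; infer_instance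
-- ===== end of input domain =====

-- B is a different algorithm: sort the characters, then one adjacent-comparison scan
-- (duplicates are adjacent after sorting; the same scan rejects '0').

-- ===== PORT A =====
-- for g in str(i): if g not in lst and g != '0': lst.append(g); return len(lst) == len(str(i))
def pan_chifr (i : Int) : Bool :=
  let s := PySem.Int.toChars i
  let lst := s.foldl (fun lst g => if g ∉ lst ∧ g ≠ '0' then lst ++ [g] else lst) ([] : List Char)
  lst.length == s.length

-- ===== PORT B =====
-- prev = None; for g in sorted(str(i)): if g == '0' or g == prev: return False; prev = g; return True
def pvScanB : Option Char → List Char → Bool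
  | _, [] => true
  | prev, g :: rest => if g = '0' ∨ some g = prev then false else pvScanB (some g) rest

def pan_chifr_alt (i : Int) : Bool :=
  pvScanB none (PySem.List.sorted (PySem.Int.toChars i) (fun c => c) false)

-- ===== PRECONDITION & SPEC =====
def Spec_pan_chifr (i : Int) (out : Bool) : Prop := out = pan_chifr_alt i
instance (i : Int) (out : Bool) : Decidable (Spec_pan_chifr i out) := by unfold Spec_pan_chifr; infer_instance

-- ===== CLAIM (what is proved, stated in full; the proofs are below) =====
def Claim_equal_pan_chifr : Prop := ∀ (i : Int), Dom_pan_chifr i → Spec_pan_chifr i (pan_chifr i)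

-- ===== LEMMAS AND PROOFS =====

-- A's loop: the accumulated list never grows past acc.length + cs.length
theorem pvLoopA_le (cs acc : List Char) :
    (cs.foldl (fun lst g => if g ∉ lst ∧ g ≠ '0' then lst ++ [g] else lst) acc).length
      ≤ acc.length + cs.length := by
  induction cs generalizing acc with
  | nil => simp
  | cons g cs ih =>
    simp only [List.foldl_cons, List.length_cons]
    split
    · have := ih (acc ++ [g]); simp only [List.length_append, List.length_singleton] at this; omega
    · have := ih acc; omega

-- A's loop reaches full length exactly when cs is duplicate-free, zero-free and disjoint from acc
theorem pvLoopA_iff (cs acc : List Char) :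
    (cs.foldl (fun lst g => if g ∉ lst ∧ g ≠ '0' then lst ++ [g] else lst) acc).length
      = acc.length + cs.length
      ↔ cs.Nodup ∧ '0' ∉ cs ∧ ∀ g ∈ cs, g ∉ acc := by
  induction cs generalizing acc with
  | nil => simp
  | cons g cs ih =>
    simp only [List.foldl_cons]
    by_cases h : g ∉ acc ∧ g ≠ '0'
    · rw [if_pos h,
        show acc.length + (g :: cs).length = (acc ++ [g]).length + cs.length by
          simp only [List.length_cons, List.length_append, List.length_nil]; omega,
        ih (acc ++ [g])]
      constructor
      · rintro ⟨hnd, hz, hdisj⟩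
        refine ⟨List.nodup_cons.mpr ⟨fun hg => hdisj g hg (by simp), hnd⟩, ?_, ?_⟩
        · simp only [List.mem_cons, not_or]
          exact ⟨fun he => h.2 he.symm, hz⟩
        · intro x hx
          rcases List.mem_cons.mp hx with rfl | hx
          · exact h.1
          · intro hxa; exact hdisj x hx (by simp [hxa])
      · rintro ⟨hnd, hz, hdisj⟩
        have hnd' := List.nodup_cons.mp hnd
        refine ⟨hnd'.2, fun hc => hz (by simp [hc]), ?_⟩
        intro x hx
        simp only [List.mem_append, List.mem_singleton, not_or]
        exact ⟨hdisj x (by simp [hx]), fun he => hnd'.1 (he ▸ hx)⟩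
    · rw [if_neg h]
      constructor
      · intro hl
        have hle := pvLoopA_le cs acc
        simp only [List.length_cons] at hl
        omega
      · rintro ⟨hnd, hz, hdisj⟩
        exfalso
        rw [not_and_or, not_not] at h
        rcases h with hga | hg0
        · exact hdisj g (by simp) hga
        · rw [not_not] at hg0
          exact hz (List.mem_cons.mpr (Or.inl hg0.symm))

-- B's scan succeeds iff: no '0', adjacent entries all distinct, and the head differs from prev
theorem pvScanB_iff (t : List Char) (prev : Option Char) :
    pvScanB prev t = true
      ↔ '0' ∉ t ∧ t.IsChain (· ≠ ·) ∧ ∀ h, t.head? = some h → prev ≠ some h := by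
  induction t generalizing prev with
  | nil => simp [pvScanB]
  | cons g rest ih =>
    simp only [pvScanB]
    by_cases h : g = '0' ∨ some g = prev
    · rw [if_pos h]
      simp only [Bool.false_eq_true, false_iff, not_and_or]
      rcases h with rfl | h
      · left
        exact fun hz => hz (by simp)
      · right; right
        intro hall
        exact hall g rfl h.symm
    · rw [if_neg h, ih (some g)]
      push Not at h
      constructor
      · rintro ⟨hz, hch, hhd⟩
        refine ⟨?_, ?_, ?_⟩
        · simp only [List.mem_cons, not_or]
          exact ⟨fun he => h.1 he.symm, hz⟩
        · refine List.isChain_cons.mpr ⟨?_, hch⟩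
          intro y hy he
          exact hhd y (Option.mem_def.mp hy) (by rw [he])
        · intro x hx
          simp only [List.head?_cons, Option.some.injEq] at hx
          subst hx
          intro he
          exact h.2 he.symm
      · rintro ⟨hz, hch, _⟩
        have hz' : '0' ∉ rest := fun hr => hz (by simp [hr])
        have hch' := List.isChain_cons.mp hch
        refine ⟨hz', hch'.2, ?_⟩
        intro x hx he
        simp only [Option.some.injEq] at he
        subst he
        exact hch'.1 g (Option.mem_def.mpr hx) rfl

-- a ≤-pairwise list with all adjacent entries distinct is duplicate-free
theorem pvSortedChainNodup (t : List Char) (hp : t.Pairwise (· ≤ ·))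
    (hc : t.IsChain (· ≠ ·)) : t.Nodup := by
  induction t with
  | nil => exact List.nodup_nil
  | cons g rest ih =>
    have hp' := List.pairwise_cons.mp hp
    have hc' := List.isChain_cons.mp hc
    refine List.nodup_cons.mpr ⟨?_, ih hp'.2 hc'.2⟩
    intro hg
    rcases rest with _ | ⟨h, rest'⟩
    · simp at hg
    · have hgh : g ≠ h := hc'.1 h (Option.mem_def.mpr rfl)
      rcases List.mem_cons.mp hg with rfl | hg'
      · exact hgh rfl
      · have h1 : g ≤ h := hp'.1 h (by simp)
        have h2 : h ≤ g := (List.pairwise_cons.mp hp'.2).1 g hg'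
        exact hgh (le_antisymm h1 h2)

-- a duplicate-free list has all adjacent entries distinct
theorem pvNodupChain (t : List Char) (hnd : t.Nodup) : t.IsChain (· ≠ ·) :=
  List.Pairwise.isChain hnd

-- ===== VERDICT (by name: the statement is the Claim_ definition above) =====
theorem pan_chifr_spec : Claim_equal_pan_chifr := by
  intro i _
  unfold Spec_pan_chifr pan_chifr pan_chifr_alt
  set s := PySem.Int.toChars i with hs
  set t := PySem.List.sorted s (fun c => c) false with ht
  have hperm : t.Perm s := PySem.List.sorted_perm s (fun c => c) false
  have hpw : t.Pairwise (fun a b => (fun c => c) a ≤ (fun c => c) b) :=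
    PySem.List.sorted_pairwise s (fun c => c)
  simp only at hpw
  rw [Bool.eq_iff_iff]
  have hA := pvLoopA_iff s []
  simp only [List.length_nil, Nat.zero_add, List.not_mem_nil, not_false_iff,
    implies_true, and_true] at hA
  have hB := pvScanB_iff t none
  simp only [beq_iff_eq]
  rw [hA, hB]
  constructor
  · rintro ⟨hnd, hz⟩
    refine ⟨fun hzt => hz (hperm.mem_iff.mp hzt), pvNodupChain t (hperm.nodup_iff.mpr hnd),
      by simp⟩
  · rintro ⟨hzt, hch, _⟩
    exact ⟨hperm.nodup_iff.mp (pvSortedChainNodup t hpw hch), fun hzs => hzt (hperm.mem_iff.mpr hzs)⟩
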